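-- pv_equiv track=rewrite | github.com/Cambricon/torch_mlu | tools/upstream_code_check/upstream_code_check.py | get_diff_blocks
-- ===== SOURCE A (Python) =====
-- def get_diff_blocks(diff_output):
--     """
--     Split the information obtained by git diff into individual diff blocks.
--     Return a list named diff_blocks, diff_blocks[0] is diff head information,
--     and diff_blocks[1:] are  diff blocks.
--     """
--     diff_blocks = []
--     current_block = []
--     for line in diff_output.split("\n"):
--         if line.startswith("@@"):
--             if current_block:
--                 diff_blocks.append("\n".join(current_block))
--             current_block = [line]
--         else:
--             current_block.append(line)
--     if current_block:
--         diff_blocks.append("\n".join(current_block))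
--
--     return diff_blocks
-- ===== SOURCE B (Python) =====
-- def get_diff_blocks(diff_output):
--     """
--     Split the information obtained by git diff into individual diff blocks.
--     Boundary-table decomposition: first collect the indices of all '@@' lines,
--     then emit each block by slicing between consecutive boundaries.
--     """
--     lines = diff_output.split("\n")
--     marks = [i for i, line in enumerate(lines) if line.startswith("@@")]
--     if not marks:
--         return ["\n".join(lines)]
--     diff_blocks = ["\n".join(lines[:marks[0]])] if marks[0] else []
--     for start, stop in zip(marks, marks[1:] + [len(lines)]):
--         diff_blocks.append("\n".join(lines[start:stop]))
--     return diff_blocks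
-- ===== Notes on version B (the rewrite author's own statement) =====
-- stated objective: alternative
-- what changed: Replaces A's single streaming pass with a growing accumulator block by a boundary-table decomposition: first collect the indices of all '@@' lines, then emit each block by slicing the line list between consecutive boundaries.
import Mathlib
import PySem

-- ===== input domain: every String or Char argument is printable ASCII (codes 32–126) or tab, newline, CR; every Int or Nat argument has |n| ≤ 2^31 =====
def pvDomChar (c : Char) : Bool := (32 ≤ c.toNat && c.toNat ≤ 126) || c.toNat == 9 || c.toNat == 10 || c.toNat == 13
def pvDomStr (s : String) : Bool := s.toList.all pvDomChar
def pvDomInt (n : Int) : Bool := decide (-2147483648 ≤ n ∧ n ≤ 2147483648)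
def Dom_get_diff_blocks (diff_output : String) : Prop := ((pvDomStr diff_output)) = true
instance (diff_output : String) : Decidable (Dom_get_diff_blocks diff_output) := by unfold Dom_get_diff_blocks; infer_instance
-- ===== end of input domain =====

-- B replaces A's streaming accumulator pass by a boundary-table decomposition
-- (collect the '@@' line indices, then slice between consecutive boundaries); same output, same cost.

-- ===== PORT A =====
def get_diff_blocks (diff_output : String) : List String :=
  let step : (List String × List String) → String → (List String × List String) := fun st line =>
    if PySem.Str.startswith line "@@" then
      (if st.2 ≠ [] then st.1 ++ [PySem.Str.join "\n" st.2] else st.1, [line])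
    else
      (st.1, st.2 ++ [line])
  -- diff_output.split("\n"): sep is the non-empty literal "\n", so split? is always `some`
  let st := ((PySem.Str.split? diff_output "\n").getD []).foldl step ([], [])
  if st.2 ≠ [] then st.1 ++ [PySem.Str.join "\n" st.2] else st.1

-- ===== PORT B =====
def get_diff_blocks_alt (diff_output : String) : List String :=
  let lines := (PySem.Str.split? diff_output "\n").getD []
  let marks := ((PySem.List.enumerate lines).filter
      (fun p => PySem.Str.startswith p.2 "@@")).map (·.1)
  match marks with
  | [] => [PySem.Str.join "\n" lines]
  | m0 :: rest =>
    let blocks := if m0 ≠ 0 then [PySem.Str.join "\n" (PySem.List.slice lines none (some m0))] else []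
    ((m0 :: rest).zip (rest ++ [(lines.length : Int)])).foldl
      (fun acc p => acc ++ [PySem.Str.join "\n" (PySem.List.slice lines (some p.1) (some p.2))])
      blocks

-- ===== PRECONDITION & SPEC =====
def Spec_get_diff_blocks (diff_output : String) (out : List String) : Prop := out = get_diff_blocks_alt diff_output
instance (diff_output : String) (out : List String) : Decidable (Spec_get_diff_blocks diff_output out) := by unfold Spec_get_diff_blocks; infer_instance

-- ===== CLAIM (what is proved, stated in full; the proofs are below) =====
def Claim_equal_get_diff_blocks : Prop := ∀ (diff_output : String), Dom_get_diff_blocks diff_output → Spec_get_diff_blocks diff_output (get_diff_blocks diff_output)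

-- ===== LEMMAS AND PROOFS =====

-- abbreviations used by the proofs only
def swAt (l : String) : Bool := PySem.Str.startswith l "@@"
def joinN (xs : List String) : String := PySem.Str.join "\n" xs

-- A's loop step and finalisation, as named functions
def stepA (st : List String × List String) (line : String) : List String × List String :=
  if swAt line then (if st.2 ≠ [] then st.1 ++ [joinN st.2] else st.1, [line])
  else (st.1, st.2 ++ [line])
def finishA (st : List String × List String) : List String :=
  if st.2 ≠ [] then st.1 ++ [joinN st.2] else st.1

-- prepend a (possibly empty) current block to a block list
def mergeB (cur : List String) (cs : List (List String)) : List (List String) :=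
  match cur, cs with
  | [], _ => cs
  | _, [] => [cur]
  | _, b :: bs => if swAt (b.headD "") then cur :: b :: bs else (cur ++ b) :: bs

-- the blocks of a line list, as line lists
def chunks : List String → List (List String)
  | [] => []
  | l :: ls => mergeB [l] (chunks ls)

-- indices of the '@@' lines
def natMarks : List String → List Nat
  | [] => []
  | l :: ls => (if swAt l then [0] else []) ++ (natMarks ls).map (· + 1)

-- the slices between consecutive boundaries
def segsAt (lines : List String) : List Nat → List (List String)
  | [] => []
  | m :: ms => ((m :: ms).zip (ms ++ [lines.length])).map
      (fun p => (lines.drop p.1).take (p.2 - p.1))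
def zipsegs (lines : List String) : List (List String) := segsAt lines (natMarks lines)

-- B's block structure at the line-list level
def chunksAt (lines : List String) : List Nat → List (List String)
  | [] => if lines.isEmpty then [] else [lines]
  | m :: _ => (if m ≠ 0 then [lines.take m] else []) ++ zipsegs lines
def natChunks (lines : List String) : List (List String) := chunksAt lines (natMarks lines)

theorem mergeB_single_shape (l : String) (cs : List (List String)) :
    ∃ t rest, mergeB [l] cs = (l :: t) :: rest := by
  match cs with
  | [] => exact ⟨[], [], rfl⟩
  | b :: bs =>
    by_cases h : swAt (b.head?.getD "") = true
    · exact ⟨[], b :: bs, by simp [mergeB, h]⟩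
    · exact ⟨b, bs, by simp [mergeB, h]⟩

theorem mergeB_append_single (cur : List String) (l : String) (cs : List (List String))
    (hl : swAt l = false) :
    mergeB (cur ++ [l]) cs = mergeB cur (mergeB [l] cs) := by
  match cur, cs with
  | [], cs => simp [mergeB]
  | c :: cur', [] => simp [mergeB, hl]
  | c :: cur', b :: bs =>
    by_cases h : swAt (b.head?.getD "") = true <;>
      simp [mergeB, h, hl]

theorem loopA_eq (lines : List String) :
    ∀ (blocks cur : List String),
      finishA (lines.foldl stepA (blocks, cur)) = blocks ++ (mergeB cur (chunks lines)).map joinN := by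
  induction lines with
  | nil =>
    intro blocks cur
    cases cur <;> simp [finishA, mergeB, chunks]
  | cons l ls ih =>
    intro blocks cur
    by_cases hl : swAt l = true
    · have hstep : stepA (blocks, cur) l
          = (if cur ≠ [] then blocks ++ [joinN cur] else blocks, [l]) := by
        simp [stepA, hl]
      rw [List.foldl_cons, hstep, ih]
      obtain ⟨t, rest, hm⟩ := mergeB_single_shape l (chunks ls)
      have hc : chunks (l :: ls) = (l :: t) :: rest := hm
      rw [hm]
      cases cur with
      | nil => simp [mergeB, hc]
      | cons c cs => simp [mergeB, hc, hl]
    · have hl' : swAt l = false := by simpa using hl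
      have hstep : stepA (blocks, cur) l = (blocks, cur ++ [l]) := by
        simp [stepA, hl']
      rw [List.foldl_cons, hstep, ih, mergeB_append_single cur l (chunks ls) hl']
      rfl

theorem natMarks_cons (l : String) (ls : List String) :
    natMarks (l :: ls) = (if swAt l then [0] else []) ++ (natMarks ls).map (· + 1) := rfl

-- the shift lemma: segments of (l :: ls) at shifted boundaries are segments of ls
theorem seg_shift (l : String) (ls : List String) (X Y : List Nat) :
    ((X.map (· + 1)).zip ((Y.map (· + 1)) ++ [ls.length + 1])).map
        (fun p => ((l :: ls).drop p.1).take (p.2 - p.1))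
      = (X.zip (Y ++ [ls.length])).map (fun p => (ls.drop p.1).take (p.2 - p.1)) := by
  have h1 : (Y.map (· + 1)) ++ [ls.length + 1] = (Y ++ [ls.length]).map (· + 1) := by simp
  rw [h1, List.zip_map, List.map_map]
  apply List.map_congr_left
  intro p _
  simp [Nat.succ_sub_succ]

theorem zipsegs_cons_true (l : String) (ls : List String) (m : Nat) (ms : List Nat)
    (h : natMarks ls = m :: ms) (hl : swAt l = true) :
    zipsegs (l :: ls) = (l :: ls.take m) :: zipsegs ls := by
  have hm : natMarks (l :: ls) = 0 :: (m + 1) :: ms.map (· + 1) := by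
    rw [natMarks_cons, h]; simp [hl]
  unfold zipsegs
  rw [hm, h]
  simp only [segsAt]
  have hs := seg_shift l ls (m :: ms) ms
  simp only [List.map_cons] at hs
  simp [hs]

theorem zipsegs_cons_false (l : String) (ls : List String) (m : Nat) (ms : List Nat)
    (h : natMarks ls = m :: ms) (hl : swAt l = false) :
    zipsegs (l :: ls) = zipsegs ls := by
  have hm : natMarks (l :: ls) = (m + 1) :: ms.map (· + 1) := by
    rw [natMarks_cons, h]; simp [hl]
  unfold zipsegs
  rw [hm, h]
  simp only [segsAt]
  simpa using seg_shift l ls (m :: ms) ms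

theorem chunks_eq_natChunks (lines : List String) : chunks lines = natChunks lines := by
  induction lines with
  | nil => rfl
  | cons l ls ih =>
    show mergeB [l] (chunks ls) = natChunks (l :: ls)
    rw [ih]
    rcases h : natMarks ls with _ | ⟨m, ms⟩
    · -- no '@@' line in ls
      cases ls with
      | nil =>
        by_cases hl : swAt l = true <;>
          simp [natChunks, chunksAt, natMarks, zipsegs, segsAt, mergeB, hl]
      | cons x xs =>
        have hx : swAt x = false := by
          cases hxx : swAt x
          · rfl
          · rw [natMarks_cons, hxx] at h; simp at h
        have hnc : natChunks (x :: xs) = [x :: xs] := by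
          simp [natChunks, chunksAt, h]
        rw [hnc]
        have hmm : mergeB [l] [x :: xs] = [l :: x :: xs] := by
          simp [mergeB, hx]
        rw [hmm]
        by_cases hl : swAt l = true
        · have hm2 : natMarks (l :: x :: xs) = [0] := by
            rw [natMarks_cons, h]; simp [hl]
          simp [natChunks, chunksAt, hm2, zipsegs, segsAt]
        · have hl' : swAt l = false := by simpa using hl
          have hm2 : natMarks (l :: x :: xs) = [] := by
            rw [natMarks_cons, h]; simp [hl']
          simp [natChunks, chunksAt, hm2]
    · -- ls has a first '@@' line at index m
      have hls : ls ≠ [] := by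
        intro hn; rw [hn] at h; simp [natMarks] at h
      obtain ⟨x, xs, rfl⟩ := List.exists_cons_of_ne_nil hls
      by_cases hm0 : m = 0
      · subst hm0
        -- the first line of ls is itself an '@@' line
        have hx : swAt x = true := by
          cases hxx : swAt x
          · exfalso
            rw [natMarks_cons, hxx] at h
            simp at h
            cases hnx : natMarks xs with
            | nil => rw [hnx] at h; simp at h
            | cons k ks => rw [hnx] at h; simp at h
          · rfl
        have hms : ms = (natMarks xs).map (· + 1) := by
          rw [natMarks_cons, hx] at h
          simp at h
          exact h.symm
        -- zipsegs (x :: xs) starts with a block whose head is x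
        have hb : ∃ t rest, zipsegs (x :: xs) = (x :: t) :: rest := by
          unfold zipsegs
          rw [h]
          simp only [segsAt]
          cases hmsc : ms with
          | nil =>
            refine ⟨xs, [], ?_⟩
            simp
          | cons b bs =>
            have hb1 : 1 ≤ b := by
              rw [hms] at hmsc
              cases hnx : natMarks xs with
              | nil => rw [hnx] at hmsc; simp at hmsc
              | cons k ks => rw [hnx] at hmsc; simp at hmsc; omega
            obtain ⟨b', rfl⟩ : ∃ b', b = b' + 1 := ⟨b - 1, by omega⟩
            refine ⟨xs.take b',
              (((b' + 1) :: bs).zip (bs ++ [(x :: xs).length])).map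
                (fun p => ((x :: xs).drop p.1).take (p.2 - p.1)), ?_⟩
            simp [List.zip_cons_cons, List.take_succ_cons]
        obtain ⟨t, rest, hzs⟩ := hb
        have hnc : natChunks (x :: xs) = (x :: t) :: rest := by
          simp [natChunks, chunksAt, h]
          exact hzs
        rw [hnc]
        have hmg : mergeB [l] ((x :: t) :: rest) = [l] :: (x :: t) :: rest := by
          simp [mergeB, hx]
        rw [hmg, ← hzs]
        by_cases hl : swAt l = true
        · have hm2 : natMarks (l :: x :: xs) = 0 :: 1 :: ms.map (· + 1) := by
            rw [natMarks_cons, h]; simp [hl]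
          simp [natChunks, chunksAt, hm2, zipsegs_cons_true l (x :: xs) 0 ms h hl]
        · have hl' : swAt l = false := by simpa using hl
          have hm2 : natMarks (l :: x :: xs) = 1 :: ms.map (· + 1) := by
            rw [natMarks_cons, h]; simp [hl']
          simp [natChunks, chunksAt, hm2, zipsegs_cons_false l (x :: xs) 0 ms h hl']
      · -- the first '@@' line of ls is at m > 0: ls starts with a non-'@@' head segment
        have hx : swAt x = false := by
          cases hxx : swAt x
          · rfl
          · exfalso
            rw [natMarks_cons, hxx] at h
            simp at h
            exact hm0 h.1.symm
        have hnc : natChunks (x :: xs) = ((x :: xs).take m) :: zipsegs (x :: xs) := by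
          simp [natChunks, chunksAt, h, hm0]
        rw [hnc]
        have htk : (x :: xs).take m = x :: xs.take (m - 1) := by
          cases m with
          | zero => omega
          | succ m' => simp [List.take_succ_cons]
        have hmg : mergeB [l] (((x :: xs).take m) :: zipsegs (x :: xs))
            = (l :: (x :: xs).take m) :: zipsegs (x :: xs) := by
          rw [htk]; simp [mergeB, hx]
        rw [hmg]
        by_cases hl : swAt l = true
        · have hm2 : natMarks (l :: x :: xs) = 0 :: (m + 1) :: ms.map (· + 1) := by
            rw [natMarks_cons, h]; simp [hl]
          simp [natChunks, chunksAt, hm2, zipsegs_cons_true l (x :: xs) m ms h hl]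
        · have hl' : swAt l = false := by simpa using hl
          have hm2 : natMarks (l :: x :: xs) = (m + 1) :: ms.map (· + 1) := by
            rw [natMarks_cons, h]; simp [hl']
          simp [natChunks, chunksAt, hm2, hm0, zipsegs_cons_false l (x :: xs) m ms h hl']

-- A computes map joinN of chunks
theorem portA_eq (d : String) :
    get_diff_blocks d = ((chunks ((PySem.Str.split? d "\n").getD [])).map joinN) := by
  have h : get_diff_blocks d
      = finishA (((PySem.Str.split? d "\n").getD []).foldl stepA ([], [])) := rfl
  rw [h, loopA_eq]
  simp [mergeB]

-- the index list B builds is natMarks, cast to Int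
theorem marks_eq (lines : List String) :
    ∀ s : Int, ((PySem.List.enumerate lines s).filter (fun p => swAt p.2)).map (fun x => x.1)
      = (natMarks lines).map (fun k : Nat => s + (k : Int)) := by
  induction lines with
  | nil => intro s; simp [PySem.List.enumerate_nil, natMarks]
  | cons l ls ih =>
    intro s
    have hmm : ((natMarks ls).map (· + 1)).map (fun k : Nat => s + (k : Int))
        = (natMarks ls).map (fun k : Nat => (s + 1) + (k : Int)) := by
      rw [List.map_map]
      apply List.map_congr_left
      intro k _
      simp
      push_cast
      ring
    rw [PySem.List.enumerate_cons, natMarks_cons]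
    cases hl : swAt l with
    | false =>
      have hf : List.filter (fun p => swAt p.2) ((s, l) :: PySem.List.enumerate ls (s + 1))
          = List.filter (fun p => swAt p.2) (PySem.List.enumerate ls (s + 1)) := by
        rw [List.filter_cons]; simp [hl]
      rw [hf, ih (s + 1)]
      simp only [Bool.false_eq_true, if_false, List.nil_append, List.map_map]
      apply List.map_congr_left
      intro k _
      simp
      push_cast
      ring
    | true =>
      have hf : List.filter (fun p => swAt p.2) ((s, l) :: PySem.List.enumerate ls (s + 1))
          = (s, l) :: List.filter (fun p => swAt p.2) (PySem.List.enumerate ls (s + 1)) := by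
        rw [List.filter_cons]; simp [hl]
      rw [hf, List.map_cons, ih (s + 1)]
      simp only [if_true, List.singleton_append, List.map_cons, List.map_map]
      congr 1
      · simp
      · apply List.map_congr_left
        intro k _
        simp
        push_cast
        ring

-- fold that appends one element per item is map
theorem foldl_append_map {α β : Type} (xs : List α) (f : α → β) :
    ∀ init : List β, xs.foldl (fun acc x => acc ++ [f x]) init = init ++ xs.map f := by
  induction xs with
  | nil => intro init; simp
  | cons x xs ih => intro init; simp [ih]

-- split("\n") never yields the empty list
theorem splitOn_go_ne_nil (sep : List Char) :
    ∀ (fuel : Nat) (l cur : List Char) (acc : List (List Char)),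
      PySem.Chars.splitOn.go sep fuel l cur acc ≠ [] := by
  intro fuel
  induction fuel with
  | zero => intro l cur acc; simp [PySem.Chars.splitOn.go]
  | succ n ih =>
    intro l cur acc
    cases l with
    | nil => simp [PySem.Chars.splitOn.go]
    | cons c rest =>
      rw [PySem.Chars.splitOn.go]
      split
      · exact ih _ _ _
      · exact ih _ _ _

theorem split_ne_nil (d : String) : (PySem.Str.split? d "\n").getD [] ≠ [] := by
  have h2 : PySem.Str.split? d "\n"
      = some ((PySem.Chars.splitOn d.toList ['\n']).map String.ofList) := by
    rfl
  rw [h2]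
  simp only [Option.getD_some, ne_eq, List.map_eq_nil_iff]
  exact fun hc => splitOn_go_ne_nil ['\n'] _ _ _ _ hc

-- B computes map joinN of natChunks
theorem portB_eq (d : String) :
    get_diff_blocks_alt d = ((natChunks ((PySem.Str.split? d "\n").getD [])).map joinN) := by
  have hne := split_ne_nil d
  set lines := (PySem.Str.split? d "\n").getD [] with hlines
  have hmk : ((PySem.List.enumerate lines).filter (fun p => PySem.Str.startswith p.2 "@@")).map (fun x => x.1)
      = (natMarks lines).map (fun k : Nat => (k : Int)) := by
    simpa [swAt] using marks_eq lines 0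
  show (match ((PySem.List.enumerate lines).filter (fun p => PySem.Str.startswith p.2 "@@")).map (fun x => x.1) with
    | [] => [PySem.Str.join "\n" lines]
    | m0 :: rest =>
      ((m0 :: rest).zip (rest ++ [(lines.length : Int)])).foldl
        (fun acc p => acc ++ [PySem.Str.join "\n" (PySem.List.slice lines (some p.1) (some p.2))])
        (if m0 ≠ 0 then [PySem.Str.join "\n" (PySem.List.slice lines none (some m0))] else []))
    = (natChunks lines).map joinN
  rw [hmk]
  cases hnm : natMarks lines with
  | nil =>
    simp only [List.map_nil]
    have hie : lines.isEmpty = false := by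
      cases hl : lines with
      | nil => exact absurd hl hne
      | cons a as => rfl
    simp [natChunks, chunksAt, hnm, hie, joinN]
  | cons m ms =>
    simp only [List.map_cons]
    show ((((m : Int) :: ms.map (fun k : Nat => (k : Int))).zip
          (ms.map (fun k : Nat => (k : Int)) ++ [(lines.length : Int)])).foldl
        (fun acc p => acc ++ [PySem.Str.join "\n" (PySem.List.slice lines (some p.1) (some p.2))])
        (if (m : Int) ≠ 0 then [PySem.Str.join "\n" (PySem.List.slice lines none (some (m : Int)))] else []))
      = (natChunks lines).map joinN
    rw [foldl_append_map]
    have hz : ((m : Int) :: ms.map (fun k : Nat => (k : Int))).zip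
          (ms.map (fun k : Nat => (k : Int)) ++ [(lines.length : Int)])
        = ((m :: ms).zip (ms ++ [lines.length])).map
            (Prod.map (fun k : Nat => (k : Int)) (fun k : Nat => (k : Int))) := by
      rw [show ((m : Int) :: ms.map (fun k : Nat => (k : Int)))
            = (m :: ms).map (fun k : Nat => (k : Int)) from rfl,
          show (ms.map (fun k : Nat => (k : Int)) ++ [(lines.length : Int)])
            = (ms ++ [lines.length]).map (fun k : Nat => (k : Int)) by simp,
          List.zip_map]
    rw [hz, List.map_map]
    have hhead : (if (m : Int) ≠ 0 then [PySem.Str.join "\n" (PySem.List.slice lines none (some (m : Int)))] else [])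
        = (if m ≠ 0 then [lines.take m] else []).map joinN := by
      by_cases hm : m = 0
      · simp [hm]
      · simp [hm, joinN, PySem.List.slice_to_natCast]
    rw [hhead]
    simp only [natChunks, hnm, chunksAt, zipsegs, segsAt]
    rw [List.map_append, List.map_map]
    congr 1
    apply List.map_congr_left
    intro p _
    show PySem.Str.join "\n" (PySem.List.slice lines (some (p.1 : Int)) (some (p.2 : Int)))
      = joinN ((lines.drop p.1).take (p.2 - p.1))
    rw [PySem.List.slice_natCast]
    rfl

-- ===== VERDICT (by name: the statement is the Claim_ definition above) =====
theorem get_diff_blocks_spec : Claim_equal_get_diff_blocks := by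
  intro d _
  show get_diff_blocks d = get_diff_blocks_alt d
  rw [portA_eq, portB_eq, chunks_eq_natChunks]
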